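-- pv_equiv track=rewrite | github.com/cosmicgenius/algorithm | test.py | works
-- ===== SOURCE A (Python) =====
-- def works(n):
--     going = True
--     v = [0, 0, 0]
--     while going:
--         going = False
--         if n % 2 == 0:
--             going = True
--             v[0] += 1
--             n //= 2
--         if n % 3 == 0:
--             going = True
--             v[1] += 1
--             n //= 3
--         if n % 5 == 0:
--             going = True
--             v[2] += 1
--             n //= 5
--     if n == 1:
--         return v
--     return None
-- ===== SOURCE B (Python) =====
-- def works(n):
--     def exponent(p):
--         k = 0
--         while n % p ** (k + 1) == 0:
--             k += 1
--         return k
--     a = exponent(2)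
--     b = exponent(3)
--     c = exponent(5)
--     return [a, b, c] if n == 2 ** a * 3 ** b * 5 ** c else None
-- ===== Notes on version B (the rewrite author's own statement) =====
-- stated objective: alternative
-- what changed: B never divides n: for each prime it finds the exponent as the largest k for which the (k+1)-st power of that prime still divides n, then validates by recomposing the product of the three prime powers and comparing it to n instead of reducing n to 1.
import Mathlib
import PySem

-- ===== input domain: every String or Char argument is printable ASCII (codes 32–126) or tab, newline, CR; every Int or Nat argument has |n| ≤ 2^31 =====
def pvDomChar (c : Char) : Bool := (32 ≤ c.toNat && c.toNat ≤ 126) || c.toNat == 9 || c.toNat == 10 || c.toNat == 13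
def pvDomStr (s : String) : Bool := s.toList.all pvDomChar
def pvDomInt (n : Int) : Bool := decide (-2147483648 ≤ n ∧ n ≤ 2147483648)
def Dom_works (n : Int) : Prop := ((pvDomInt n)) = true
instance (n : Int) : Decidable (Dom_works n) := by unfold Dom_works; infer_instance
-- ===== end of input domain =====

-- B never divides n: it finds each exponent as the largest k with n % p^(k+1) == 0
-- by testing growing prime powers, and validates by recomposing n = 2^a*3^b*5^c
-- instead of reducing n to 1 (objective: alternative algorithm, no division of n).

-- ===== PORT A =====
-- A's while loop: one round applies the three ifs in order; the natAbs guard only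
-- makes the recursion total — whenever n ≠ 0 it is implied by 'going' (proved below).
def worksLoop (n v0 v1 v2 : Int) : Int × Int × Int × Int :=
  let n1 := if PySem.Int.mod n 2 = 0 then PySem.Int.floordiv n 2 else n
  let w0 := if PySem.Int.mod n 2 = 0 then v0 + 1 else v0
  let n2 := if PySem.Int.mod n1 3 = 0 then PySem.Int.floordiv n1 3 else n1
  let w1 := if PySem.Int.mod n1 3 = 0 then v1 + 1 else v1
  let n3 := if PySem.Int.mod n2 5 = 0 then PySem.Int.floordiv n2 5 else n2
  let w2 := if PySem.Int.mod n2 5 = 0 then v2 + 1 else v2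
  if h : (PySem.Int.mod n 2 = 0 ∨ PySem.Int.mod n1 3 = 0 ∨ PySem.Int.mod n2 5 = 0)
      ∧ n3.natAbs < n.natAbs then
    worksLoop n3 w0 w1 w2
  else
    (n3, w0, w1, w2)
termination_by n.natAbs
decreasing_by exact h.2

def works (n : Int) : Option (List Int) :=
  match worksLoop n 0 0 0 with
  | (m, a, b, c) => if m = 1 then some [a, b, c] else none

-- ===== PORT B =====
-- exponent(p): while n % p**(k+1) == 0: k += 1. The natAbs bound only makes the
-- recursion total; whenever n ≠ 0 it is implied by the divisibility (proved below).
def expLoop (p n : Int) (k : Nat) : Nat :=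
  if h : PySem.Int.mod n (p ^ (k + 1)) = 0 ∧ k + 1 ≤ n.natAbs then
    expLoop p n (k + 1)
  else k
termination_by n.natAbs - k
decreasing_by omega

def works_alt (n : Int) : Option (List Int) :=
  let a := expLoop 2 n 0
  let b := expLoop 3 n 0
  let c := expLoop 5 n 0
  if n = 2 ^ a * 3 ^ b * 5 ^ c then some [(a : Int), (b : Int), (c : Int)] else none

-- ===== PRECONDITION & SPEC =====
-- Pre_ excludes only n = 0, on which the Python A (and B) loops forever.
def Pre_works (n : Int) : Prop := n ≠ 0
instance (n : Int) : Decidable (Pre_works n) := by unfold Pre_works; infer_instance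
def pvWitness_works : Int := 60

def Spec_works (n : Int) (out : Option (List Int)) : Prop := out = works_alt n
instance (n : Int) (out : Option (List Int)) : Decidable (Spec_works n out) := by unfold Spec_works; infer_instance

-- ===== CLAIM (what is proved, stated in full; the proofs are below) =====
def Claim_equal_works : Prop := ∀ (n : Int), Dom_works n → Pre_works n → Spec_works n (works n)

-- ===== LEMMAS AND PROOFS =====

def Reduced (m : Int) : Prop := ¬(2:Int) ∣ m ∧ ¬(3:Int) ∣ m ∧ ¬(5:Int) ∣ m

-- One exact division by p ≥ 2: product identity, nonzero, strict natAbs decrease.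
lemma strip_step {p n : Int} (hp : 2 ≤ p) (hd : p ∣ n) (hn : n ≠ 0) :
    p * (n / p) = n ∧ n / p ≠ 0 ∧ (n / p).natAbs < n.natAbs := by
  have h1 : n / p * p = n := Int.ediv_mul_cancel hd
  have h2 : n / p ≠ 0 := by
    intro h0; rw [h0, zero_mul] at h1; exact hn h1.symm
  refine ⟨by linarith [h1], h2, ?_⟩
  have hmul : n.natAbs = (n / p).natAbs * p.natAbs := by
    conv_lhs => rw [← h1]
    rw [Int.natAbs_mul]
  have hq : 0 < (n / p).natAbs := Int.natAbs_pos.mpr h2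
  have hpn : 2 ≤ p.natAbs := by omega
  calc (n / p).natAbs < (n / p).natAbs * p.natAbs := by
        exact (Nat.lt_mul_iff_one_lt_right hq).mpr (by omega)
    _ = n.natAbs := hmul.symm

lemma worksLoop_spec :
    ∀ N : ℕ, ∀ n v0 v1 v2 : Int, n.natAbs ≤ N → n ≠ 0 →
      ∃ (i j k : ℕ) (m : Int), worksLoop n v0 v1 v2 = (m, v0 + (i:Int), v1 + (j:Int), v2 + (k:Int)) ∧
        2 ^ i * 3 ^ j * 5 ^ k * m = n ∧ Reduced m ∧ m ≠ 0 := by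
  intro N
  induction N with
  | zero => intro n v0 v1 v2 h hn; exfalso; omega
  | succ N ih =>
    intro n v0 v1 v2 hle hn
    have tail : ∀ (a b c : ℕ) (nf : Int), nf ≠ 0 → nf.natAbs ≤ N →
        2 ^ a * 3 ^ b * 5 ^ c * nf = n →
        ∃ (i j k : ℕ) (m : Int),
          worksLoop nf (v0 + (a:Int)) (v1 + (b:Int)) (v2 + (c:Int)) =
            (m, v0 + (i:Int), v1 + (j:Int), v2 + (k:Int)) ∧
          2 ^ i * 3 ^ j * 5 ^ k * m = n ∧ Reduced m ∧ m ≠ 0 := by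
      intro a b c nf hnf hle' hpr
      obtain ⟨i, j, k, m, h1, hp2, h3', h4⟩ := ih nf (v0 + a) (v1 + b) (v2 + c) hle' hnf
      refine ⟨a + i, b + j, c + k, m, ?_, ?_, h3', h4⟩
      · rw [h1]; simp only [Prod.mk.injEq]; push_cast
        exact ⟨trivial, by ring, by ring, by ring⟩
      · rw [← hpr, ← hp2]; ring
    by_cases h2 : (2:Int) ∣ n
    · obtain ⟨heq2, hne2, hlt2⟩ := strip_step (p := 2) (by norm_num) h2 hn
      by_cases h3 : (3:Int) ∣ (n / 2)
      · obtain ⟨heq3, hne3, hlt3⟩ := strip_step (p := 3) (by norm_num) h3 hne2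
        by_cases h5 : (5:Int) ∣ (n / 2 / 3)
        · obtain ⟨heq5, hne5, hlt5⟩ := strip_step (p := 5) (by norm_num) h5 hne3
          have hlt : (n / 2 / 3 / 5).natAbs < n.natAbs := by omega
          have step : worksLoop n v0 v1 v2 = worksLoop (n / 2 / 3 / 5) (v0 + 1) (v1 + 1) (v2 + 1) := by
            rw [worksLoop]; simp [h2, h3, h5, hlt]
          rw [step]
          simpa using tail 1 1 1 (n / 2 / 3 / 5) hne5 (by omega)
            (by linear_combination (6:Int) * heq5 + 2 * heq3 + heq2)
        · have hlt : (n / 2 / 3).natAbs < n.natAbs := by omega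
          have step : worksLoop n v0 v1 v2 = worksLoop (n / 2 / 3) (v0 + 1) (v1 + 1) v2 := by
            rw [worksLoop]; simp [h2, h3, h5, hlt]
          rw [step]
          simpa using tail 1 1 0 (n / 2 / 3) hne3 (by omega)
            (by linear_combination (2:Int) * heq3 + heq2)
      · by_cases h5 : (5:Int) ∣ (n / 2)
        · obtain ⟨heq5, hne5, hlt5⟩ := strip_step (p := 5) (by norm_num) h5 hne2
          have hlt : (n / 2 / 5).natAbs < n.natAbs := by omega
          have step : worksLoop n v0 v1 v2 = worksLoop (n / 2 / 5) (v0 + 1) v1 (v2 + 1) := by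
            rw [worksLoop]; simp [h2, h3, h5, hlt]
          rw [step]
          simpa using tail 1 0 1 (n / 2 / 5) hne5 (by omega)
            (by linear_combination (2:Int) * heq5 + heq2)
        · have step : worksLoop n v0 v1 v2 = worksLoop (n / 2) (v0 + 1) v1 v2 := by
            rw [worksLoop]; simp [h2, h3, h5, hlt2]
          rw [step]
          simpa using tail 1 0 0 (n / 2) hne2 (by omega) (by linear_combination heq2)
    · by_cases h3 : (3:Int) ∣ n
      · obtain ⟨heq3, hne3, hlt3⟩ := strip_step (p := 3) (by norm_num) h3 hn
        by_cases h5 : (5:Int) ∣ (n / 3)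
        · obtain ⟨heq5, hne5, hlt5⟩ := strip_step (p := 5) (by norm_num) h5 hne3
          have hlt : (n / 3 / 5).natAbs < n.natAbs := by omega
          have step : worksLoop n v0 v1 v2 = worksLoop (n / 3 / 5) v0 (v1 + 1) (v2 + 1) := by
            rw [worksLoop]; simp [h2, h3, h5, hlt]
          rw [step]
          simpa using tail 0 1 1 (n / 3 / 5) hne5 (by omega)
            (by linear_combination (3:Int) * heq5 + heq3)
        · have step : worksLoop n v0 v1 v2 = worksLoop (n / 3) v0 (v1 + 1) v2 := by
            rw [worksLoop]; simp [h2, h3, h5, hlt3]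
          rw [step]
          simpa using tail 0 1 0 (n / 3) hne3 (by omega) (by linear_combination heq3)
      · by_cases h5 : (5:Int) ∣ n
        · obtain ⟨heq5, hne5, hlt5⟩ := strip_step (p := 5) (by norm_num) h5 hn
          have step : worksLoop n v0 v1 v2 = worksLoop (n / 5) v0 v1 (v2 + 1) := by
            rw [worksLoop]; simp [h2, h3, h5, hlt5]
          rw [step]
          simpa using tail 0 0 1 (n / 5) hne5 (by omega) (by linear_combination heq5)
        · have step : worksLoop n v0 v1 v2 = (n, v0, v1, v2) := by
            rw [worksLoop]; simp [h2, h3, h5]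
          refine ⟨0, 0, 0, n, ?_, by norm_num, ⟨h2, h3, h5⟩, hn⟩
          rw [step]; norm_num

lemma prime_not_dvd_pow_mul {p q : Int} (hp : Prime p) (hq : ¬ p ∣ q) {e : ℕ} {m : Int}
    (hm : ¬ p ∣ m) : ¬ p ∣ q ^ e * m :=
  fun h => (hp.dvd_mul.mp h).elim (fun h1 => hq (hp.dvd_of_dvd_pow h1)) hm

lemma prime_five : Prime (5 : Int) := Int.prime_iff_natAbs_prime.mpr (by norm_num)

-- If p^(k+1) divides n ≠ 0 and 2 ≤ p, then k+1 ≤ |n| (the totality bound in expLoop).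
lemma exp_bound {p n : Int} (hp : 2 ≤ p) (hn : n ≠ 0) {k : ℕ}
    (hd : p ^ (k + 1) ∣ n) : k + 1 ≤ n.natAbs := by
  have h1 : p.natAbs ^ (k + 1) ∣ n.natAbs := by
    have := Int.natAbs_dvd_natAbs.mpr hd
    simpa [Int.natAbs_pow] using this
  have h2 : p.natAbs ^ (k + 1) ≤ n.natAbs :=
    Nat.le_of_dvd (Int.natAbs_pos.mpr hn) h1
  have h3 : 2 ^ (k + 1) ≤ p.natAbs ^ (k + 1) :=
    Nat.pow_le_pow_left (by omega) _
  have h4 : k + 1 < 2 ^ (k + 1) := Nat.lt_two_pow_self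
  omega

-- expLoop returns the exact p-adic exponent: p^r ∣ n and ¬ p^(r+1) ∣ n.
lemma expLoop_spec {p n : Int} (hp : 2 ≤ p) (hn : n ≠ 0) :
    ∀ M k : ℕ, n.natAbs - k ≤ M → p ^ k ∣ n →
      p ^ (expLoop p n k) ∣ n ∧ ¬ p ^ (expLoop p n k + 1) ∣ n := by
  intro M
  induction M with
  | zero =>
    intro k hM hk
    rw [expLoop]
    by_cases hd : p ^ (k + 1) ∣ n
    · exfalso; have := exp_bound hp hn hd; omega
    · rw [dif_neg (fun h => hd ((PySem.Int.mod_eq_zero_iff_dvd n _).mp h.1))]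
      exact ⟨hk, hd⟩
  | succ M ih =>
    intro k hM hk
    rw [expLoop]
    by_cases hd : p ^ (k + 1) ∣ n
    · have hb := exp_bound hp hn hd
      rw [dif_pos ⟨(PySem.Int.mod_eq_zero_iff_dvd n _).mpr hd, hb⟩]
      exact ih (k + 1) (by omega) hd
    · rw [dif_neg (fun h => hd ((PySem.Int.mod_eq_zero_iff_dvd n _).mp h.1))]
      exact ⟨hk, hd⟩

-- The p-adic exponent is unique: if n = p^i * s with p ∤ s, any r with
-- p^r ∣ n and ¬ p^(r+1) ∣ n equals i.
lemma exp_eq {p : Int} (hp : Prime p) {i : ℕ} {s n : Int} (hs : ¬ p ∣ s)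
    (hn : n = p ^ i * s) {r : ℕ} (h1 : p ^ r ∣ n) (h2 : ¬ p ^ (r + 1) ∣ n) : r = i := by
  have hi1 : ¬ p ^ (i + 1) ∣ n := by
    rintro ⟨t, ht⟩
    apply hs
    have hcancel : s = p * t := by
      have hpi : (p : Int) ^ i ≠ 0 := pow_ne_zero _ hp.ne_zero
      have : p ^ i * s = p ^ i * (p * t) := by rw [← hn, ht]; ring
      exact mul_left_cancel₀ hpi this
    exact ⟨t, hcancel⟩
  have hii : p ^ i ∣ n := ⟨s, hn⟩
  rcases lt_trichotomy r i with h | h | h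
  · exact absurd (dvd_trans (pow_dvd_pow p (by omega : r + 1 ≤ i)) hii) h2
  · exact h
  · exact absurd (dvd_trans (pow_dvd_pow p (by omega : i + 1 ≤ r)) h1) hi1

-- ===== VERDICT (by name: the statement is the Claim_ definition above) =====
theorem works_spec : Claim_equal_works := by
  intro n hdom hpre
  unfold Spec_works
  obtain ⟨i, j, k, m, heq, hprod, ⟨hm2, hm3, hm5⟩, hm⟩ :=
    worksLoop_spec n.natAbs n 0 0 0 le_rfl hpre
  -- B's three exponents equal i, j, k.
  obtain ⟨ha1, ha2⟩ := expLoop_spec (p := 2) (by norm_num) hpre n.natAbs 0 (by omega) (by simp)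
  obtain ⟨hb1, hb2⟩ := expLoop_spec (p := 3) (by norm_num) hpre n.natAbs 0 (by omega) (by simp)
  obtain ⟨hc1, hc2⟩ := expLoop_spec (p := 5) (by norm_num) hpre n.natAbs 0 (by omega) (by simp)
  have hs2 : ¬ (2:Int) ∣ 3 ^ j * 5 ^ k * m := by
    have := prime_not_dvd_pow_mul (q := 3) (e := j) (m := 5 ^ k * m) Int.prime_two (by decide)
      (prime_not_dvd_pow_mul (q := 5) (e := k) Int.prime_two (by decide) hm2)
    simpa [mul_assoc] using this
  have hs3 : ¬ (3:Int) ∣ 2 ^ i * 5 ^ k * m := by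
    have := prime_not_dvd_pow_mul (q := 2) (e := i) (m := 5 ^ k * m) Int.prime_three (by decide)
      (prime_not_dvd_pow_mul (q := 5) (e := k) Int.prime_three (by decide) hm3)
    simpa [mul_assoc] using this
  have hs5 : ¬ (5:Int) ∣ 2 ^ i * 3 ^ j * m := by
    have := prime_not_dvd_pow_mul (q := 2) (e := i) (m := 3 ^ j * m) prime_five (by decide)
      (prime_not_dvd_pow_mul (q := 3) (e := j) prime_five (by decide) hm5)
    simpa [mul_assoc] using this
  have ha : expLoop 2 n 0 = i :=
    exp_eq Int.prime_two hs2 (by rw [← hprod]; ring) ha1 ha2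
  have hb : expLoop 3 n 0 = j :=
    exp_eq Int.prime_three hs3 (by rw [← hprod]; ring) hb1 hb2
  have hc : expLoop 5 n 0 = k :=
    exp_eq prime_five hs5 (by rw [← hprod]; ring) hc1 hc2
  have hP : (2:Int) ^ i * 3 ^ j * 5 ^ k ≠ 0 := by positivity
  simp only [works, works_alt, heq, ha, hb, hc]
  by_cases hm1 : m = 1
  · subst hm1
    rw [if_pos rfl, if_pos (by rw [← hprod]; ring)]
    norm_num
  · rw [if_neg hm1, if_neg]
    intro hcontra
    apply hm1
    have : 2 ^ i * 3 ^ j * 5 ^ k * m = 2 ^ i * 3 ^ j * 5 ^ k * 1 := by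
      rw [hprod, mul_one]; exact hcontra
    exact mul_left_cancel₀ hP this
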